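-- pv_equiv track=rewrite | github.com/natebottman/complex-2associahedra | Kr.py | K_list_of_lists
-- ===== SOURCE A (Python) =====
-- from copy import deepcopy
-- from itertools import product
--
-- def parts(nums):
--     # Returns all partitions of a list
--
--     if len(nums) == 1:
--         return [[nums]]
--     elif len(nums) >= 2:
--         new_parts = []
--         for part in parts(nums[:-1]):
--             # we take all partitions of the first n-1 elements
--
--             new_parts += [part + [[nums[-1]]]]
--             # for every such partition, we include the new partition
--             # where the n-th element is on its own
--
--             temp_part = deepcopy(part)
--             temp_part[-1] += [nums[-1]]
--             new_parts += [temp_part]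
--         return new_parts
--
-- def cleaned_parts(nums):
--     l = parts(nums)
--     l.remove([nums])
--     return l
--
-- def nicer_prod(*args):
--     return list(list(t) for t in product(*args))
--
-- def flatten(l):
--     return [subitem for item in l for subitem in item]
--
-- def K_list_of_lists(nums):
--     if len(nums) == 1:
--         return [[[nums[0]]]]
--     elif len(nums) == 2:
--         return [[[nums[0]],[nums[1]]]]
--     elif len(nums) >= 3:
--         bs_list = []
--         for outer_bs in cleaned_parts(nums):
--             sub_bs_list = nicer_prod(*[K_list_of_lists(part) \
--                                        for part in outer_bs])
--             sub_bs_list = [flatten(item) for item in sub_bs_list]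
--             bs_list += [sub_bs + [outer_b for outer_b in outer_bs \
--                                   if (outer_b not in sub_bs)] \
--                             for sub_bs in sub_bs_list]
--         return bs_list
-- ===== SOURCE B (Python) =====
-- def K_list_of_lists(nums):
--     n = len(nums)
--     if n == 1:
--         return [[[nums[0]]]]
--     elif n == 2:
--         return [[[nums[0]], [nums[1]]]]
--     elif n >= 3:
--         out = []
--         # each mask m encodes a non-trivial contiguous segmentation of nums:
--         # bit (n-1-i) of m set  <=>  a block boundary right before position i
--         for m in range(2 ** (n - 1) - 1, 0, -1):
--             blocks = []
--             cur = [nums[0]]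
--             for i in range(1, n):
--                 if (m // 2 ** (n - 1 - i)) % 2 == 1:
--                     blocks.append(cur)
--                     cur = [nums[i]]
--                 else:
--                     cur = cur + [nums[i]]
--             blocks.append(cur)
--             combos = [[]]
--             for blk in blocks:
--                 combos = [acc + sub for acc in combos for sub in K_list_of_lists(blk)]
--             out += [combo + [blk for blk in blocks if blk not in combo]
--                     for combo in combos]
--         return out
-- ===== Notes on version B (the rewrite author's own statement) =====
-- stated objective: alternative
-- what changed: The recursive deepcopy-based parts()/cleaned_parts() partition generator is replaced by direct in-line bitmask enumeration of the non-trivial contiguous segmentations (masks counted down so the emission order matches, mask 0 skipped in place of cleaned_parts' remove), and the itertools.product-then-flatten step is fused into a single accumulator fold.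
-- outside the precondition, e.g. on K_list_of_lists([]): A returns None, B returns None
import Mathlib
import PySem

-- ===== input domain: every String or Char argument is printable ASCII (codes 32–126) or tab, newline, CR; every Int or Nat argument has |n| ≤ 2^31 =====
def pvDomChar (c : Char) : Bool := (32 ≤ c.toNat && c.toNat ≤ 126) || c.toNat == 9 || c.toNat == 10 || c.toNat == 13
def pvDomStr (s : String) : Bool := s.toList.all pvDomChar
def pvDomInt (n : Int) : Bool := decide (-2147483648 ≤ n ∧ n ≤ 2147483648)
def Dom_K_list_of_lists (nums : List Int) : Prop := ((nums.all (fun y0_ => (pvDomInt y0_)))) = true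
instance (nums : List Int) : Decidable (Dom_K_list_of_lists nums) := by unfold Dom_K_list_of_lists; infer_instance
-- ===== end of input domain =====

-- B replaces the recursive deepcopy-based partition generator by a direct bitmask
-- enumeration of contiguous segmentations and folds the product/flatten step into one
-- accumulator loop (objective: alternative; same return value).

-- ===== PORT A =====
-- parts(nums): nums[:-1] ported as dropLast (exact); nums[-1] / part[-1] via pyGetD (lists nonempty in this branch)
def partsA (nums : List Int) : List (List (List Int)) :=
  if nums.length = 1 then [[nums]]
  else if _h : 2 ≤ nums.length then
    (partsA nums.dropLast).foldl
      (fun acc part =>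
        acc ++ [part ++ [[PySem.List.pyGetD nums (-1) 0]]]
            ++ [part.dropLast ++ [PySem.List.pyGetD part (-1) [] ++ [PySem.List.pyGetD nums (-1) 0]]])
      []
  else []  -- len(nums) = 0: Python returns None here (excluded by Pre_)
termination_by nums.length
decreasing_by simp [List.length_dropLast]; omega

-- l.remove([nums]): ValueError impossible ([nums] is always a member), so .getD [] is unreached
def cleanedA (nums : List Int) : List (List (List Int)) :=
  (PySem.List.remove? (partsA nums) [nums]).getD []

-- nicer_prod: itertools.product(*args) as lists
def nicerProdA (ls : List (List (List (List Int)))) : List (List (List (List Int))) :=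
  ls.foldr (fun l acc => l.flatMap (fun x => acc.map (fun t => x :: t))) [[]]

-- recursion made total with fuel; fuel = len(nums)+1 at entry never runs out (blocks are strictly shorter)
def K_A : Nat → List Int → List (List (List Int))
  | 0, _ => []
  | fuel + 1, nums =>
    if nums.length = 1 then [[[PySem.List.pyGetD nums 0 0]]]
    else if nums.length = 2 then [[[PySem.List.pyGetD nums 0 0], [PySem.List.pyGetD nums 1 0]]]
    else if 3 ≤ nums.length then
      (cleanedA nums).foldl
        (fun bs_list outer_bs =>
          bs_list ++
            ((nicerProdA (outer_bs.map (fun part => K_A fuel part))).map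
                (fun item => item.flatMap (fun x => x))).map
              (fun sub_bs => sub_bs ++ outer_bs.filter (fun b => !(sub_bs.contains b))))
        []
    else []  -- len(nums) = 0: Python returns None here (excluded by Pre_)

def K_list_of_lists (nums : List Int) : List (List (List Int)) :=
  K_A (nums.length + 1) nums

-- ===== PORT B =====
-- inner loop of Source B building (blocks, cur); the exponent n-1-i is ≥ 0 for i in range(1,n), ported via .toNat
def segB (nums : List Int) (n : Nat) (m : Int) : List (List Int) × List Int :=
  (PySem.List.pyRange 1 (n : Int) 1).foldl
    (fun st i =>
      if PySem.Int.mod (PySem.Int.floordiv m ((2 : Int) ^ ((n : Int) - 1 - i).toNat)) 2 = 1 then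
        (st.1 ++ [st.2], [PySem.List.pyGetD nums i 0])
      else (st.1, st.2 ++ [PySem.List.pyGetD nums i 0]))
    ([], [PySem.List.pyGetD nums 0 0])

-- recursion made total with fuel; fuel = len(nums)+1 at entry never runs out (blocks are strictly shorter)
def K_B : Nat → List Int → List (List (List Int))
  | 0, _ => []
  | fuel + 1, nums =>
    let n := nums.length
    if n = 1 then [[[PySem.List.pyGetD nums 0 0]]]
    else if n = 2 then [[[PySem.List.pyGetD nums 0 0], [PySem.List.pyGetD nums 1 0]]]
    else if 3 ≤ n then
      (PySem.List.pyRange ((2 : Int) ^ (n - 1) - 1) 0 (-1)).foldl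
        (fun out m =>
          let st := segB nums n m
          let blocks := st.1 ++ [st.2]
          out ++
            (blocks.foldl
                (fun combos blk => combos.flatMap (fun acc => (K_B fuel blk).map (fun sub => acc ++ sub)))
                [[]]).map
              (fun combo => combo ++ blocks.filter (fun blk => !(combo.contains blk))))
        []
    else []  -- len(nums) = 0: Python returns None here (excluded by Pre_)

def K_list_of_lists_alt (nums : List Int) : List (List (List Int)) :=
  K_B (nums.length + 1) nums

-- ===== PRECONDITION & SPEC =====
-- Pre_ excludes only the empty list, on which Python's K_list_of_lists falls through and returns None (not a list)
def Pre_K_list_of_lists (nums : List Int) : Prop := nums ≠ []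
instance (nums : List Int) : Decidable (Pre_K_list_of_lists nums) := by unfold Pre_K_list_of_lists; infer_instance
def pvWitness_K_list_of_lists : List Int := [1, 2, 3]

def Spec_K_list_of_lists (nums : List Int) (out : List (List (List Int))) : Prop := out = K_list_of_lists_alt nums
instance (nums : List Int) (out : List (List (List Int))) : Decidable (Spec_K_list_of_lists nums out) := by unfold Spec_K_list_of_lists; infer_instance

-- ===== CLAIM (what is proved, stated in full; the proofs are below) =====
def Claim_equal_K_list_of_lists : Prop := ∀ (nums : List Int), Dom_K_list_of_lists nums → Pre_K_list_of_lists nums → Spec_K_list_of_lists nums (K_list_of_lists nums)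

-- ===== LEMMAS AND PROOFS =====

-- B's blocks list for mask m
def bmask (nums : List Int) (n : Nat) (m : Int) : List (List Int) :=
  (segB nums n m).1 ++ [(segB nums n m).2]

-- one element appended on the right shifts the mask: segB (ys++[x]) (2q+b) extends segB ys q by one step
theorem segB_append (ys : List Int) (x : Int) (q b : Int) (hys : ys ≠ []) (hb0 : 0 ≤ b) (hb1 : b < 2) :
    segB (ys ++ [x]) (ys.length + 1) (2 * q + b) =
      if b = 1 then ((segB ys ys.length q).1 ++ [(segB ys ys.length q).2], [x])
      else ((segB ys ys.length q).1, (segB ys ys.length q).2 ++ [x]) := by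
  have hlen : 1 ≤ ys.length := List.length_pos_iff.mpr hys
  have hlen' : (1 : Int) ≤ (ys.length : Int) := by exact_mod_cast hlen
  unfold segB
  have hcast : ((ys.length + 1 : Nat) : Int) = (ys.length : Int) + 1 := by push_cast; ring
  rw [hcast, PySem.List.pyRange_one_succ_right hlen', List.foldl_append]
  -- the init values agree
  have hinit : PySem.List.pyGetD (ys ++ [x]) 0 0 = PySem.List.pyGetD ys 0 0 := by
    cases ys with
    | nil => exact absurd rfl hys
    | cons a t => simp [PySem.List.pyGetD_zero_cons]
  rw [hinit]
  -- the fold over pyRange 1 len 1 agrees step by step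
  have hfold :
      (PySem.List.pyRange 1 (ys.length : Int) 1).foldl
        (fun (st : List (List Int) × List Int) i =>
          if PySem.Int.mod (PySem.Int.floordiv (2 * q + b) ((2 : Int) ^ (((ys.length : Int) + 1) - 1 - i).toNat)) 2 = 1 then
            (st.1 ++ [st.2], [PySem.List.pyGetD (ys ++ [x]) i 0])
          else (st.1, st.2 ++ [PySem.List.pyGetD (ys ++ [x]) i 0]))
        ([], [PySem.List.pyGetD ys 0 0]) =
      (PySem.List.pyRange 1 (ys.length : Int) 1).foldl
        (fun (st : List (List Int) × List Int) i =>
          if PySem.Int.mod (PySem.Int.floordiv q ((2 : Int) ^ ((ys.length : Int) - 1 - i).toNat)) 2 = 1 then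
            (st.1 ++ [st.2], [PySem.List.pyGetD ys i 0])
          else (st.1, st.2 ++ [PySem.List.pyGetD ys i 0]))
        ([], [PySem.List.pyGetD ys 0 0]) := by
    apply PySem.List.foldl_congr_mem
    intro st i hi
    rw [PySem.List.mem_pyRange_one] at hi
    obtain ⟨hi1, hi2⟩ := hi
    have hget : PySem.List.pyGetD (ys ++ [x]) i 0 = PySem.List.pyGetD ys i 0 := by
      rw [PySem.List.pyGetD_eq_getElem _ _ (by omega) (by simp; omega),
          PySem.List.pyGetD_eq_getElem _ _ (by omega) (by omega)]
      exact List.getElem_append_left (by omega)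
    have he : (((ys.length : Int) + 1) - 1 - i).toNat = ((ys.length : Int) - 1 - i).toNat + 1 := by omega
    have hdiv : PySem.Int.floordiv (2 * q + b) ((2 : Int) ^ ((((ys.length : Int) + 1) - 1 - i).toNat)) =
        PySem.Int.floordiv q ((2 : Int) ^ (((ys.length : Int) - 1 - i).toNat)) := by
      rw [he, PySem.Int.floordiv_eq_ediv_of_pos (by positivity),
          PySem.Int.floordiv_eq_ediv_of_pos (by positivity), pow_succ]
      rw [mul_comm ((2:Int) ^ _) 2, ← Int.ediv_ediv_of_nonneg (by norm_num)]
      congr 1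
      omega
    rw [hget, hdiv]
  rw [hfold]
  -- final step at i = ys.length
  have he0 : (((ys.length : Int) + 1) - 1 - (ys.length : Int)).toNat = 0 := by omega
  have hgetx : PySem.List.pyGetD (ys ++ [x]) (ys.length : Int) 0 = x := by
    rw [PySem.List.pyGetD_eq_getElem _ _ (by omega) (by simp)]
    simp
  have hmod : PySem.Int.mod (PySem.Int.floordiv (2 * q + b) ((2 : Int) ^ ((((ys.length : Int) + 1) - 1 - (ys.length : Int)).toNat))) 2 = b := by
    rw [he0, pow_zero, PySem.Int.floordiv_eq_ediv_of_pos (by norm_num), Int.ediv_one,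
        PySem.Int.mod_eq_emod_of_pos (by norm_num)]
    omega
  simp only [List.foldl_cons, List.foldl_nil]
  simp only [hmod, hgetx]


theorem segB_zero (nums : List Int) (h : nums ≠ []) : segB nums nums.length 0 = ([], nums) := by
  induction nums using List.reverseRecOn with
  | nil => exact absurd rfl h
  | append_singleton ys x ih =>
    by_cases hys : ys = []
    · subst hys
      simp [segB, PySem.List.pyRange_one_eq_nil (by norm_num : (1:Int) ≤ 1), PySem.List.pyGetD_zero]
    · have hstep := segB_append ys x 0 0 hys (by norm_num) (by norm_num)
      have hys' := ih hys
      rw [show (2:Int) * 0 + 0 = 0 by ring] at hstep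
      rw [show (ys ++ [x]).length = ys.length + 1 by simp, hstep, if_neg (by norm_num), hys']

theorem bmask_length (nums : List Int) (h : nums ≠ []) (m : Int) (hm0 : 0 ≤ m)
    (hmlt : m < 2 ^ (nums.length - 1)) (hne : m ≠ 0) : 2 ≤ (bmask nums nums.length m).length := by
  induction nums using List.reverseRecOn generalizing m with
  | nil => exact absurd rfl h
  | append_singleton ys x ih =>
    by_cases hys : ys = []
    · subst hys
      simp only [List.nil_append, List.length_singleton] at hmlt
      norm_num at hmlt
      omega
    · have hlen : 1 ≤ ys.length := List.length_pos_iff.mpr hys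
      have hd : m = 2 * (m / 2) + m % 2 := by omega
      have hb0 : (0 : Int) ≤ m % 2 := by omega
      have hb1 : m % 2 < 2 := by omega
      have hstep := segB_append ys x (m / 2) (m % 2) hys hb0 hb1
      have hL : (ys ++ [x]).length = ys.length + 1 := by simp
      have hpow : (2 : Int) ^ ((ys ++ [x]).length - 1) = 2 * 2 ^ (ys.length - 1) := by
        rw [hL]
        have : ys.length + 1 - 1 = (ys.length - 1) + 1 := by omega
        rw [this, pow_succ]
        ring
      rw [hpow] at hmlt
      rw [bmask, hL, ← hd] at *
      rw [hstep]
      by_cases hb : m % 2 = 1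
      · rw [if_pos hb]
        simp
      · rw [if_neg hb]
        have hb' : m % 2 = 0 := by omega
        have hq : m / 2 ≠ 0 := by omega
        have := ih hys (m / 2) (by omega) (by omega) hq
        rw [bmask] at this
        simp at this ⊢
        omega

-- parts(nums) is exactly the bitmask segmentations, masks in decreasing order
theorem pyRange_countdown (k : Nat) :
    PySem.List.pyRange (k : Int) 0 (-1) = ((List.range k).reverse).map (fun j => Int.ofNat j + 1) := by
  induction k with
  | zero => simp [PySem.List.pyRange_neg_one_eq_nil]
  | succ k ih =>
    rw [show ((k + 1 : Nat) : Int) = (k : Int) + 1 by push_cast; ring,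
        PySem.List.pyRange_neg_one_cons (by omega), List.range_succ]
    simp [add_sub_cancel_right, ih, List.reverse_append]

theorem range_reverse_double (k : Nat) :
    (List.range (2 * k)).reverse = ((List.range k).reverse).flatMap (fun q => [2 * q + 1, 2 * q]) := by
  induction k with
  | zero => simp
  | succ k ih =>
    rw [show 2 * (k + 1) = (2 * k + 1) + 1 by ring, List.range_succ, List.range_succ, List.range_succ]
    simp [List.reverse_append, ih]

theorem range_reverse_split (k : Nat) (hk : 1 ≤ k) :
    (List.range k).reverse = ((List.range (k - 1)).reverse).map (fun j => j + 1) ++ [0] := by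
  obtain ⟨k', rfl⟩ : ∃ k', k = k' + 1 := ⟨k - 1, by omega⟩
  rw [List.range_succ_eq_map]
  simp [List.map_reverse]

theorem partsA_eq_bmask (nums : List Int) (h : nums ≠ []) :
    partsA nums = ((List.range (2 ^ (nums.length - 1))).reverse).map
      (fun j => bmask nums nums.length (Int.ofNat j)) := by
  induction nums using List.reverseRecOn with
  | nil => exact absurd rfl h
  | append_singleton ys x ih =>
    by_cases hys : ys = []
    · subst hys
      rw [partsA]
      have hz := segB_zero [x] (by simp)
      simp only [List.length_cons, List.length_nil] at hz
      simp [bmask, hz]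
    · have hlen : 1 ≤ ys.length := List.length_pos_iff.mpr hys
      have hL : (ys ++ [x]).length = ys.length + 1 := by simp
      rw [partsA, if_neg (by simp; omega), dif_pos (by simp; omega), List.dropLast_concat]
      simp only [PySem.List.pyGetD_neg_one_append_singleton]
      rw [PySem.List.foldl_congr_mem _ _
            (fun acc part => acc ++ [part ++ [[x]],
              part.dropLast ++ [PySem.List.pyGetD part (-1) [] ++ [x]]]) []
            (by intro acc p hp; simp),
          PySem.List.foldl_append_eq_flatMap, List.nil_append, ih hys]
      rw [hL]
      have hp2 : (2 : Nat) ^ (ys.length + 1 - 1) = 2 * 2 ^ (ys.length - 1) := by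
        have h2 : ys.length + 1 - 1 = (ys.length - 1) + 1 := by omega
        rw [h2, pow_succ]; ring
      rw [hp2, range_reverse_double]
      rw [List.flatMap_map, List.map_flatMap]
      refine congrArg (fun F => List.flatMap F ((List.range (2 ^ (ys.length - 1))).reverse)) ?_
      funext j
      simp only [Int.ofNat_eq_natCast]
      have h1 := segB_append ys x (j : Int) 1 hys (by norm_num) (by norm_num)
      have h0 := segB_append ys x (j : Int) 0 hys (by norm_num) (by norm_num)
      rw [if_pos rfl] at h1
      rw [if_neg (by norm_num)] at h0
      simp only [bmask, List.dropLast_concat, PySem.List.pyGetD_neg_one_append_singleton,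
        List.map_cons, List.map_nil]
      rw [show ((2 * j + 1 : Nat) : Int) = 2 * (j : Int) + 1 by push_cast; ring,
          show ((2 * j : Nat) : Int) = 2 * (j : Int) + 0 by push_cast; ring,
          h1, h0]
theorem remove_append_last {α : Type} [BEq α] [LawfulBEq α] (L : List α) (a : α) (ha : a ∉ L) :
    PySem.List.remove? (L ++ [a]) a = some L := by
  induction L with
  | nil => simp
  | cons y t ih =>
    have hy : y ≠ a := by intro e; exact ha (e ▸ List.mem_cons_self)
    rw [List.cons_append, PySem.List.remove?_cons_of_ne _ hy,
        ih (fun hm => ha (List.mem_cons_of_mem _ hm))]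
    rfl

theorem cleanedA_eq (nums : List Int) (h : 3 ≤ nums.length) :
    cleanedA nums = ((List.range (2 ^ (nums.length - 1) - 1)).reverse).map
      (fun j => bmask nums nums.length (Int.ofNat j + 1)) := by
  have hne : nums ≠ [] := by intro e; rw [e] at h; simp at h
  have hK : 1 ≤ 2 ^ (nums.length - 1) := Nat.one_le_two_pow
  rw [cleanedA, partsA_eq_bmask nums hne, range_reverse_split _ hK, List.map_append, List.map_map]
  have hF0 : bmask nums nums.length (Int.ofNat 0) = [nums] := by
    rw [bmask, show Int.ofNat 0 = 0 from rfl, segB_zero nums hne]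
    rfl
  have hnm : [nums] ∉ ((List.range (2 ^ (nums.length - 1) - 1)).reverse).map
      ((fun j => bmask nums nums.length (Int.ofNat j)) ∘ (fun j => j + 1)) := by
    intro hmem
    obtain ⟨j, hj, hEq⟩ := List.mem_map.mp hmem
    have hjlt : j < 2 ^ (nums.length - 1) - 1 := List.mem_range.mp (List.mem_reverse.mp hj)
    have hlen2 : 2 ≤ (bmask nums nums.length ((j + 1 : Nat) : Int)).length := by
      apply bmask_length nums hne _ (by positivity)
      · have hcast : ((2 ^ (nums.length - 1) : Nat) : Int) = (2 : Int) ^ (nums.length - 1) := by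
          push_cast; ring
        rw [← hcast]
        exact_mod_cast (by omega : j + 1 < 2 ^ (nums.length - 1))
      · omega
    rw [Function.comp_apply, Int.ofNat_eq_natCast] at hEq
    rw [hEq] at hlen2
    simp at hlen2
  simp only [List.map_cons, List.map_nil, hF0]
  rw [remove_append_last _ _ hnm]
  simp only [Option.getD_some]
  apply List.map_congr_left
  intro j hj
  simp [Int.ofNat_eq_natCast]

theorem prod_fold_gen (ls : List (List (List (List Int)))) (A : List (List (List Int))) :
    ls.foldl (fun combos blk => combos.flatMap (fun acc => blk.map (fun sub => acc ++ sub))) A =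
      A.flatMap (fun a => ((nicerProdA ls).map (fun item => item.flatMap (fun x => x))).map (fun t => a ++ t)) := by
  induction ls generalizing A with
  | nil => simp [nicerProdA]
  | cons l ls ih =>
    rw [List.foldl_cons, ih]
    simp [nicerProdA, List.flatMap_map, List.map_flatMap, List.map_map,
      List.flatMap_assoc, List.append_assoc]
    simp [Function.comp_def]

theorem prod_flatten_eq_foldl (ls : List (List (List (List Int)))) :
    (nicerProdA ls).map (fun item => item.flatMap (fun x => x)) =
      ls.foldl (fun combos blk => combos.flatMap (fun acc => blk.map (fun sub => acc ++ sub))) [[]] := by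
  rw [prod_fold_gen]
  simp

theorem K_A_eq_K_B (fuel : Nat) (nums : List Int) : K_A fuel nums = K_B fuel nums := by
  induction fuel generalizing nums with
  | zero => rfl
  | succ fuel ih =>
    simp only [K_A, K_B]
    by_cases h1 : nums.length = 1
    · simp [h1]
    by_cases h2 : nums.length = 2
    · simp [h2]
    by_cases h3 : 3 ≤ nums.length
    case neg => simp [h1, h2, h3]
    simp only [h1, h2, h3, if_false, if_pos]
    -- rewrite A's recursive calls to B's using the fuel induction hypothesis
    rw [show (fun part => K_A fuel part) = (fun part => K_B fuel part) from funext ih]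
    -- A's product-then-flatten equals B's accumulator loop
    have hbody : ∀ obs : List (List Int),
        ((nicerProdA (obs.map (fun part => K_B fuel part))).map (fun item => item.flatMap (fun x => x))) =
          obs.foldl (fun combos blk => combos.flatMap (fun acc => (K_B fuel blk).map (fun sub => acc ++ sub))) [[]] := by
      intro obs
      rw [prod_flatten_eq_foldl, List.foldl_map]
    simp only [hbody]
    rw [PySem.List.foldl_append_eq_flatMap, PySem.List.foldl_append_eq_flatMap,
        List.nil_append, List.nil_append, cleanedA_eq nums h3, List.flatMap_map]
    have h1K : (1 : Nat) ≤ 2 ^ (nums.length - 1) := Nat.one_le_two_pow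
    have hcastK : ((2 : Int) ^ (nums.length - 1) - 1) = ((2 ^ (nums.length - 1) - 1 : Nat) : Int) := by
      rw [Nat.cast_sub h1K]
      push_cast
      ring
    rw [hcastK, pyRange_countdown, List.flatMap_map]
    refine congrArg (fun F => List.flatMap F ((List.range (2 ^ (nums.length - 1) - 1)).reverse)) ?_
    funext j
    simp only [bmask]

-- ===== VERDICT (by name: the statement is the Claim_ definition above) =====
theorem K_list_of_lists_spec : Claim_equal_K_list_of_lists := by
  intro nums _ _
  unfold Spec_K_list_of_lists K_list_of_lists K_list_of_lists_alt
  exact K_A_eq_K_B (nums.length + 1) nums
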